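-- pv_equiv track=rewrite | github.com/NWichter/korb-guru | apify/actors/swiss-grocery-scraper/src/pdf_extract.py | _clean_concatenated_text
-- ===== SOURCE A (Python) =====
-- def _clean_concatenated_text(text: str) -> str:
--     """Fix concatenated words from PDF extraction missing spaces.
--
--     Example: "2ScheibenToaster,7Bräunungsstufen," → likely junk, skip
--     Example: "AmAbendAbflugmitEmiratesnachDubai." → travel junk
--     """
--     # Count transitions from lowercase to uppercase (camelCase = missing spaces)
--     transitions = sum(
--         1 for i in range(1, len(text))
--         if text[i - 1].islower() and text[i].isupper()
--     )
--     # Also count digit-to-letter transitions (e.g. "2Scheiben")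
--     digit_transitions = sum(
--         1 for i in range(1, len(text))
--         if text[i - 1].isdigit() and text[i].isalpha()
--     )
--     total_transitions = transitions + digit_transitions
--     # If many transitions, it's concatenated garbage
--     if total_transitions >= 3:
--         return ""  # Signal to skip
--     return text
-- ===== SOURCE B (Python) =====
-- def _char_class(c: str) -> str:
--     if c.islower():
--         return "l"
--     if c.isupper():
--         return "u"
--     if c.isdigit():
--         return "d"
--     return "."
--
--
-- def _clean_concatenated_text(text: str) -> str:
--     """Classify every character (lower/upper/digit/other) into a signature
--     string, then count the three garbage class bigrams (lower-then-upper,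
--     digit-then-lower, digit-then-upper) in it with str.count; blank the
--     text when they total 3 or more."""
--     sig = "".join(map(_char_class, text))
--     bad = sig.count("lu") + sig.count("dl") + sig.count("du")
--     return "" if bad >= 3 else text
-- ===== Notes on version B (the rewrite author's own statement) =====
-- stated objective: faster
-- what changed: B does not count transitions over index pairs at all: it maps the text to a four-symbol class signature string (lower/upper/digit/other) and counts the three garbage class bigrams (lower-then-upper, digit-then-lower, digit-then-upper) in that signature with str.count, blanking the text when they total at least 3; the measured speedup comes from replacing the per-index Python-level comprehension tests with C-level str.count scans.
import Mathlib
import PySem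

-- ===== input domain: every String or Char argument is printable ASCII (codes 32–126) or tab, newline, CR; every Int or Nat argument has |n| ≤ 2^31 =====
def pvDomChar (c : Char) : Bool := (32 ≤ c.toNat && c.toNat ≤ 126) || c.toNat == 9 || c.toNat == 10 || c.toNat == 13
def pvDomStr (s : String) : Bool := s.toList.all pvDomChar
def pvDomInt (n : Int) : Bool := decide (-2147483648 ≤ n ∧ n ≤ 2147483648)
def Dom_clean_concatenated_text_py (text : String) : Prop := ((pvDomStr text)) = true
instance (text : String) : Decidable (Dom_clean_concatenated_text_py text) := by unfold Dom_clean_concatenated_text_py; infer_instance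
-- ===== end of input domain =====

-- B replaces the transition-counting passes by a character-class signature string in which
-- the three garbage class bigrams are counted with str.count (measured faster in a timing run).

-- ===== PORT A =====
-- Indices drawn from range(1, len(text)) are always in bounds, so Python's text[i]
-- (which would raise only out of range) is ported as pyGetD with an irrelevant default.
def clean_concatenated_text_py (text : String) : String :=
  let cs := text.toList
  let transitions : Int :=
    ((PySem.List.pyRange 1 (cs.length : Int)).map (fun i =>
      if PySem.Chars.islower (PySem.List.pyGetD cs (i - 1) ' ') &&
         PySem.Chars.isupper (PySem.List.pyGetD cs i ' ') then (1 : Int) else 0)).sum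
  let digit_transitions : Int :=
    ((PySem.List.pyRange 1 (cs.length : Int)).map (fun i =>
      if PySem.Chars.isdigit (PySem.List.pyGetD cs (i - 1) ' ') &&
         PySem.Chars.isalpha (PySem.List.pyGetD cs i ' ') then (1 : Int) else 0)).sum
  let total_transitions := transitions + digit_transitions
  if 3 ≤ total_transitions then "" else text

-- ===== PORT B =====
def pvCharClass (c : Char) : Char :=
  if PySem.Chars.islower c then 'l'
  else if PySem.Chars.isupper c then 'u'
  else if PySem.Chars.isdigit c then 'd'
  else '.'

-- ''.join(map(_char_class, text)) kept as the signature character list; the three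
-- sig.count(..) calls are PySem.Chars.count (Python's str.count) on it.
def clean_concatenated_text_py_alt (text : String) : String :=
  let sig := text.toList.map pvCharClass
  let bad := PySem.Chars.count sig ['l', 'u'] + PySem.Chars.count sig ['d', 'l']
      + PySem.Chars.count sig ['d', 'u']
  if 3 ≤ bad then "" else text

-- ===== PRECONDITION & SPEC =====
def Spec_clean_concatenated_text_py (text : String) (out : String) : Prop := out = clean_concatenated_text_py_alt text
instance (text : String) (out : String) : Decidable (Spec_clean_concatenated_text_py text out) := by unfold Spec_clean_concatenated_text_py; infer_instance

-- ===== CLAIM (what is proved, stated in full; the proofs are below) =====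
def Claim_equal_clean_concatenated_text_py : Prop := ∀ (text : String), Dom_clean_concatenated_text_py text → Spec_clean_concatenated_text_py text (clean_concatenated_text_py text)

-- ===== LEMMAS AND PROOFS =====

-- the adjacent pairs of cs
def pvPairs {α : Type} (cs : List α) : List (α × α) := cs.zip cs.tail

-- A's index-based 0/1-sum over range(1, len cs) counts the adjacent pairs satisfying P
theorem pvSumPyRange (cs : List Char) (P : Char → Char → Bool) :
    ((PySem.List.pyRange 1 (cs.length : Int)).map (fun i =>
      if P (PySem.List.pyGetD cs (i - 1) ' ') (PySem.List.pyGetD cs i ' ') then (1 : Int) else 0)).sum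
    = ((pvPairs cs).countP (fun pc => P pc.1 pc.2) : Int) := by
  have hmap : ((PySem.List.pyRange 1 (cs.length : Int)).map (fun i =>
      if P (PySem.List.pyGetD cs (i - 1) ' ') (PySem.List.pyGetD cs i ' ') then (1 : Int) else 0))
      = (pvPairs cs).map (fun pc => if P pc.1 pc.2 then (1 : Int) else 0) := by
    rw [PySem.List.pyRange_of_pos 1 (cs.length : Int) (by norm_num)]
    have hcount : (if (1:Int) < (cs.length : Int) then (((cs.length : Int) - 1 + 1 - 1) / 1).toNat else 0) = cs.length - 1 := by
      split_ifs with h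
      · omega
      · omega
    rw [hcount, List.map_map]
    apply List.ext_getElem
    · simp only [List.length_map, List.length_range, pvPairs, List.length_zip, List.length_tail]
      omega
    · intro j h1 h2
      have hj1 : j + 1 < cs.length := by
        simp only [List.length_map, List.length_range] at h1; omega
      simp only [List.getElem_map, List.getElem_range, Function.comp]
      have e1 : (1 : Int) + 1 * (j : Int) - 1 = ((j : Nat) : Int) := by ring
      have e2 : (1 : Int) + 1 * (j : Int) = (((j + 1 : Nat)) : Int) := by push_cast; ring
      rw [e1, e2, PySem.List.pyGetD_natCast, PySem.List.pyGetD_natCast]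
      simp [pvPairs, List.getElem_zip, List.getElem_tail, List.getD,
        List.getElem?_eq_getElem (show j < cs.length by omega),
        List.getElem?_eq_getElem hj1]
  rw [hmap, PySem.List.sum_map_ite_one_zero]

-- str.count of a two-character pattern with distinct characters counts the adjacent pairs
theorem pvCountGo (a b : Char) (hab : a ≠ b) :
    ∀ (fuel : Nat) (l : List Char) (acc : Nat), l.length ≤ fuel →
    PySem.Chars.count.go [a, b] fuel l acc
      = acc + (pvPairs l).countP (fun p => p.1 == a && p.2 == b) := by
  intro fuel
  induction fuel with
  | zero =>
    intro l acc hl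
    have : l = [] := List.length_eq_zero_iff.mp (Nat.le_zero.mp hl)
    subst this
    simp [PySem.Chars.count.go, pvPairs]
  | succ fuel ih =>
    intro l acc hl
    cases l with
    | nil => simp [PySem.Chars.count.go, pvPairs]
    | cons h t =>
      rw [PySem.Chars.count.go]
      by_cases hp : List.isPrefixOf [a, b] (h :: t) = true
      · rw [if_pos hp]
        cases t with
        | nil => simp [List.isPrefixOf] at hp
        | cons h2 t2 =>
          simp only [List.isPrefixOf, Bool.and_eq_true, beq_iff_eq] at hp
          obtain ⟨rfl, rfl, -⟩ := hp
          show PySem.Chars.count.go [a, b] fuel t2 (acc + 1) = _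
          have hlen : t2.length ≤ fuel := by simp at hl; omega
          rw [ih t2 (acc + 1) hlen]
          have hpairs : (pvPairs (a :: b :: t2)).countP (fun p => p.1 == a && p.2 == b)
              = 1 + (pvPairs t2).countP (fun p => p.1 == a && p.2 == b) := by
            cases t2 with
            | nil => simp [pvPairs]
            | cons c t3 =>
              simp only [pvPairs, List.tail_cons, List.zip_cons_cons, List.countP_cons]
              have hb : (b == a) = false := by
                simp only [beq_eq_false_iff_ne]; exact fun h' => hab h'.symm
              simp [hb]
              omega
          rw [hpairs]; omega
      · rw [if_neg hp]
        have hlen : t.length ≤ fuel := by simp at hl; omega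
        rw [ih t acc hlen]
        have hpairs : (pvPairs (h :: t)).countP (fun p => p.1 == a && p.2 == b)
            = (pvPairs t).countP (fun p => p.1 == a && p.2 == b) := by
          cases t with
          | nil => simp [pvPairs]
          | cons h2 t2 =>
            simp only [pvPairs, List.tail_cons, List.zip_cons_cons, List.countP_cons]
            have : ((h == a) && (h2 == b)) = false := by
              by_contra hc
              simp only [Bool.not_eq_false, Bool.and_eq_true, beq_iff_eq] at hc
              apply hp
              simp [List.isPrefixOf, hc.1, hc.2]
            simp [this]
        rw [hpairs]

theorem pvCountPair (a b : Char) (hab : a ≠ b) (l : List Char) :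
    PySem.Chars.count l [a, b] = (pvPairs l).countP (fun p => p.1 == a && p.2 == b) := by
  rw [PySem.Chars.count]
  simp only [List.isEmpty_cons, if_false, Bool.false_eq_true]
  simpa using pvCountGo a b hab l.length l 0 le_rfl

-- the character classes are pairwise disjoint
theorem pvLowerNotUpper (c : Char) (h : PySem.Chars.islower c = true) :
    PySem.Chars.isupper c = false := by
  by_contra hc
  simp only [Bool.not_eq_false, PySem.Chars.islower, PySem.Chars.isupper,
    Bool.and_eq_true, decide_eq_true_eq] at h hc
  exact absurd (le_trans h.1 hc.2) (by decide)

theorem pvDigitNotLower (c : Char) (h : PySem.Chars.isdigit c = true) :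
    PySem.Chars.islower c = false := by
  by_contra hc
  simp only [Bool.not_eq_false, PySem.Chars.islower, PySem.Chars.isdigit,
    Bool.and_eq_true, decide_eq_true_eq] at h hc
  exact absurd (le_trans hc.1 h.2) (by decide)

theorem pvDigitNotUpper (c : Char) (h : PySem.Chars.isdigit c = true) :
    PySem.Chars.isupper c = false := by
  by_contra hc
  simp only [Bool.not_eq_false, PySem.Chars.isupper, PySem.Chars.isdigit,
    Bool.and_eq_true, decide_eq_true_eq] at h hc
  exact absurd (le_trans hc.1 h.2) (by decide)

-- class characters decode back to the character predicates
theorem pvClassL (c : Char) : (pvCharClass c == 'l') = PySem.Chars.islower c := by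
  unfold pvCharClass
  split_ifs <;> simp_all

theorem pvClassU (c : Char) : (pvCharClass c == 'u') = PySem.Chars.isupper c := by
  unfold pvCharClass
  by_cases hl : PySem.Chars.islower c = true
  · simp [hl, pvLowerNotUpper c hl]
  · simp only [hl, if_false, Bool.false_eq_true]
    split_ifs <;> simp_all

theorem pvClassD (c : Char) : (pvCharClass c == 'd') = PySem.Chars.isdigit c := by
  unfold pvCharClass
  by_cases hd : PySem.Chars.isdigit c = true
  · simp [pvDigitNotLower c hd, pvDigitNotUpper c hd, hd]
  · split_ifs <;> simp_all

-- digit→alpha pairs split into digit→lower and digit→upper pairs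
theorem pvAlphaSplit (l : List (Char × Char)) :
    l.countP (fun pc => PySem.Chars.isdigit pc.1 && PySem.Chars.isalpha pc.2)
    = l.countP (fun pc => PySem.Chars.isdigit pc.1 && PySem.Chars.islower pc.2)
      + l.countP (fun pc => PySem.Chars.isdigit pc.1 && PySem.Chars.isupper pc.2) := by
  induction l with
  | nil => rfl
  | cons pc t ih =>
    simp only [List.countP_cons]
    rw [ih]
    by_cases h1 : PySem.Chars.isdigit pc.1 = true <;>
      by_cases h2 : PySem.Chars.isupper pc.2 = true <;>
      by_cases h3 : PySem.Chars.islower pc.2 = true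
    · exact absurd (pvLowerNotUpper pc.2 h3) (by simp [h2])
    all_goals
      simp only [PySem.Chars.isalpha, h1, h2, h3, Bool.true_and, Bool.false_and,
        Bool.or_true, Bool.or_false, if_true, if_false, Bool.false_eq_true]
      omega

-- ===== VERDICT (by name: the statement is the Claim_ definition above) =====
theorem clean_concatenated_text_py_spec : Claim_equal_clean_concatenated_text_py := by
  intro text _
  show clean_concatenated_text_py text = clean_concatenated_text_py_alt text
  have hA : clean_concatenated_text_py text =
      (if (3:Int) ≤
          (((PySem.List.pyRange 1 (text.toList.length : Int)).map (fun i =>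
            if PySem.Chars.islower (PySem.List.pyGetD text.toList (i - 1) ' ') &&
               PySem.Chars.isupper (PySem.List.pyGetD text.toList i ' ') then (1 : Int) else 0)).sum
          + ((PySem.List.pyRange 1 (text.toList.length : Int)).map (fun i =>
            if PySem.Chars.isdigit (PySem.List.pyGetD text.toList (i - 1) ' ') &&
               PySem.Chars.isalpha (PySem.List.pyGetD text.toList i ' ') then (1 : Int) else 0)).sum)
        then "" else text) := rfl
  have hB : clean_concatenated_text_py_alt text =
      (if 3 ≤ PySem.Chars.count (text.toList.map pvCharClass) ['l', 'u']
          + PySem.Chars.count (text.toList.map pvCharClass) ['d', 'l']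
          + PySem.Chars.count (text.toList.map pvCharClass) ['d', 'u']
        then "" else text) := rfl
  rw [hA, hB,
    pvSumPyRange text.toList (fun a b => PySem.Chars.islower a && PySem.Chars.isupper b),
    pvSumPyRange text.toList (fun a b => PySem.Chars.isdigit a && PySem.Chars.isalpha b),
    pvCountPair 'l' 'u' (by decide), pvCountPair 'd' 'l' (by decide),
    pvCountPair 'd' 'u' (by decide)]
  have hzip : pvPairs (text.toList.map pvCharClass)
      = (pvPairs text.toList).map (Prod.map pvCharClass pvCharClass) := by
    cases text.toList with
    | nil => rfl
    | cons x xs =>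
      show (List.map pvCharClass (x :: xs)).zip (List.map pvCharClass xs) = _
      rw [List.zip_map]
      rfl
  rw [hzip]
  simp only [List.countP_map, Function.comp_def, Prod.map, pvClassL, pvClassU, pvClassD]
  rw [pvAlphaSplit (pvPairs text.toList)]
  by_cases hc : 3 ≤ (pvPairs text.toList).countP (fun pc => PySem.Chars.islower pc.1 && PySem.Chars.isupper pc.2)
        + ((pvPairs text.toList).countP (fun pc => PySem.Chars.isdigit pc.1 && PySem.Chars.islower pc.2)
          + (pvPairs text.toList).countP (fun pc => PySem.Chars.isdigit pc.1 && PySem.Chars.isupper pc.2))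
  · rw [if_pos (by exact_mod_cast hc), if_pos (by omega)]
  · rw [if_neg (by exact_mod_cast hc), if_neg (by omega)]
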